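-- pv_equiv track=rewrite | github.com/YouNotKissMe/geometry | Lab2/1.py | func
-- ===== SOURCE A (Python) =====
-- def func(n):
--     z = []
--     a = {}
--     for i in range(10):
--         for j in range(10):
--             a[(i, j)] = 0
--             for q in range(len(n)):
--                 a2 = []
--                 if (i * n[q][3] - n[q][1] + j) * (i * n[q][0] - n[q][2] + j) == 0:
--                     a2.append(1)
--                 else:
--                     a2.append(0)
--                 a[(i, j)] += sum(a2)
--
--     a1 = None
--     for x, y in a.items():
--         if a1 is None:
--             a1 = x
--         else:
--             if a[a1] < y:
--                 a1 = x
--     return a1[0], a1[1]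
-- ===== SOURCE B (Python) =====
-- def func(n):
--     # One pass over the records: each record can only hit cells (i, j) whose j is a
--     # root of one of the two linear factors, so increment at most 2 cells per (record, i)
--     # instead of testing all 100 cells per record.
--     a = {(i, j): 0 for i in range(10) for j in range(10)}
--     for row in n:
--         for i in range(10):
--             r1 = row[1] - i * row[3]
--             r2 = row[2] - i * row[0]
--             roots = (r1,) if r1 == r2 else (r1, r2)
--             for j in roots:
--                 if 0 <= j <= 9:
--                     a[(i, j)] += 1
--     return max(a, key=a.get)
-- ===== Notes on version B (the rewrite author's own statement) =====
-- stated objective: faster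
-- what changed: Instead of testing the zero-product condition at every one of the 100 cells for every record (100*len(n) tests), B makes one pass over the records and, for each record and each i, increments only the at most two cells whose j is an integer root of one of the linear factors, then takes the first-maximal cell with max(a, key=a.get).
import Mathlib
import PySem

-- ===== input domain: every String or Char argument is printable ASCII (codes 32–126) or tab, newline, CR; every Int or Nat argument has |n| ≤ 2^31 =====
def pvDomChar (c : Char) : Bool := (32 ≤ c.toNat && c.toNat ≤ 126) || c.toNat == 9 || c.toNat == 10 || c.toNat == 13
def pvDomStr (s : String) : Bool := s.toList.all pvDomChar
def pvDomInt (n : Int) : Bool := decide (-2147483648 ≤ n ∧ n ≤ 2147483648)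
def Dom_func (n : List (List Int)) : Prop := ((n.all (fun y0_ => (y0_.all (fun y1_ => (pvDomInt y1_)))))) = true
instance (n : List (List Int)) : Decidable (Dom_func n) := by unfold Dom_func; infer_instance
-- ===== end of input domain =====

-- B makes one pass over the records, incrementing only the at most two cells per (record, i)
-- whose j solves a linear factor, instead of testing all 100 cells per record (measured faster).

-- ===== PORT A =====
-- A-side helper: the dict-building triple loop of A ('z = []' is dead code and dropped)
def funcA_a (n : List (List Int)) : PySem.Dict (Int × Int) Int :=
  (PySem.List.pyRange 0 10 1).foldl (fun a i =>
    (PySem.List.pyRange 0 10 1).foldl (fun a j =>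
      let a := a.insert (i, j) 0
      (PySem.List.pyRange 0 (PySem.List.len n) 1).foldl (fun a q =>
        let a2 : List Int := []
        let a2 := if (i * PySem.List.pyGetD (PySem.List.pyGetD n q []) 3 0
                        - PySem.List.pyGetD (PySem.List.pyGetD n q []) 1 0 + j)
                    * (i * PySem.List.pyGetD (PySem.List.pyGetD n q []) 0 0
                        - PySem.List.pyGetD (PySem.List.pyGetD n q []) 2 0 + j) = 0
                  then a2 ++ [1] else a2 ++ [0]
        a.insert (i, j) (a.getD (i, j) 0 + a2.sum)) a) a)
    PySem.Dict.empty

def func (n : List (List Int)) : Int × Int :=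
  let a := funcA_a n
  let a1 : Option (Int × Int) :=
    a.items.foldl (fun a1 xy =>
      match a1 with
      | none => some xy.1
      | some k => if a.getD k 0 < xy.2 then some xy.1 else a1) none
  -- a1 = None is unreachable (the dict always has 100 keys), where Python would raise
  match a1 with
  | some k => (k.1, k.2)
  | none => (0, 0)

-- ===== PORT B =====
-- B-side helper: the dict comprehension initialising all 100 cells to 0
def funcB_init : PySem.Dict (Int × Int) Int :=
  (PySem.List.pyRange 0 10 1).foldl (fun d i =>
    (PySem.List.pyRange 0 10 1).foldl (fun d j => d.insert (i, j) 0) d) PySem.Dict.empty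

-- B-side helper: the single pass over the records incrementing root cells
def funcB_a (n : List (List Int)) : PySem.Dict (Int × Int) Int :=
  n.foldl (fun d row =>
    (PySem.List.pyRange 0 10 1).foldl (fun d i =>
      let r1 := PySem.List.pyGetD row 1 0 - i * PySem.List.pyGetD row 3 0
      let r2 := PySem.List.pyGetD row 2 0 - i * PySem.List.pyGetD row 0 0
      let roots : List Int := if r1 = r2 then [r1] else [r1, r2]
      roots.foldl (fun d j =>
        if 0 ≤ j ∧ j ≤ 9 then d.modify (i, j) 0 (· + 1) else d) d) d) funcB_init

def func_alt (n : List (List Int)) : Int × Int :=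
  let a := funcB_a n
  (PySem.List.max? a.keys (fun k => a.getD k 0)).getD (0, 0)

-- ===== PRECONDITION & SPEC =====
-- Pre_ excludes exactly the inputs where A raises IndexError: a record with fewer than 4 fields.
def Pre_func (n : List (List Int)) : Prop := ∀ row ∈ n, 4 ≤ row.length
instance (n : List (List Int)) : Decidable (Pre_func n) := by unfold Pre_func; infer_instance
def pvWitness_func : List (List Int) := [[1, 2, 3, 4], [0, 5, 5, 0]]

def Spec_func (n : List (List Int)) (out : Int × Int) : Prop := out = func_alt n
instance (n : List (List Int)) (out : Int × Int) : Decidable (Spec_func n out) := by unfold Spec_func; infer_instance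

-- ===== CLAIM (what is proved, stated in full; the proofs are below) =====
def Claim_equal_func : Prop := ∀ (n : List (List Int)), Dom_func n → Pre_func n → Spec_func n (func n)

-- ===== LEMMAS AND PROOFS =====

def pvInd (i j : Int) (row : List Int) : Int :=
  if (i * PySem.List.pyGetD row 3 0 - PySem.List.pyGetD row 1 0 + j)
       * (i * PySem.List.pyGetD row 0 0 - PySem.List.pyGetD row 2 0 + j) = 0 then 1 else 0

def pvCnt (n : List (List Int)) (c : Int × Int) : Int := (n.map (pvInd c.1 c.2)).sum

-- A's inner loop body as a row-fold
def pvStepA (n : List (List Int)) (a : PySem.Dict (Int × Int) Int) (c : Int × Int) :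
    PySem.Dict (Int × Int) Int :=
  (PySem.List.pyRange 0 (PySem.List.len n) 1).foldl (fun a q =>
    let a2 : List Int := []
    let a2 := if (c.1 * PySem.List.pyGetD (PySem.List.pyGetD n q []) 3 0
                    - PySem.List.pyGetD (PySem.List.pyGetD n q []) 1 0 + c.2)
                * (c.1 * PySem.List.pyGetD (PySem.List.pyGetD n q []) 0 0
                    - PySem.List.pyGetD (PySem.List.pyGetD n q []) 2 0 + c.2) = 0
              then a2 ++ [1] else a2 ++ [0]
    a.insert (c.1, c.2) (a.getD (c.1, c.2) 0 + a2.sum)) (a.insert (c.1, c.2) 0)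

theorem pvRowBody_sum (i j : Int) (row : List Int) :
    (if (i * PySem.List.pyGetD row 3 0 - PySem.List.pyGetD row 1 0 + j)
          * (i * PySem.List.pyGetD row 0 0 - PySem.List.pyGetD row 2 0 + j) = 0
       then ([] : List Int) ++ [1] else ([] : List Int) ++ [0]).sum = pvInd i j row := by
  simp only [pvInd]; split <;> simp

theorem pvFoldIns_get? (c : Int × Int) (g : List Int → Int) (m : List (List Int)) :
    ∀ (d : PySem.Dict (Int × Int) Int) (v : Int), d.get? c = some v → ∀ k,
      (m.foldl (fun a row => a.insert c (a.getD c 0 + g row)) d).get? k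
        = if k = c then some (v + (m.map g).sum) else d.get? k := by
  induction m with
  | nil =>
    intro d v hv k
    simp only [List.foldl_nil, List.map_nil, List.sum_nil, add_zero]
    split
    · next h => rw [h, hv]
    · rfl
  | cons row m ih =>
    intro d v hv k
    have hd : d.getD c 0 = v := by rw [PySem.Dict.getD_eq_get?_getD, hv]; rfl
    rw [List.foldl_cons, ih (d.insert c (d.getD c 0 + g row)) (v + g row)
        (by rw [PySem.Dict.get?_insert]; simp [hd]) k]
    split
    · simp [add_assoc]
    · next h => rw [PySem.Dict.get?_insert_of_ne _ _ h]

theorem pvFoldIns_keys (c : Int × Int) (g : List Int → Int) (m : List (List Int)) :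
    ∀ (d : PySem.Dict (Int × Int) Int), d.contains c = true →
      (m.foldl (fun a row => a.insert c (a.getD c 0 + g row)) d).keys = d.keys := by
  induction m with
  | nil => intro d _; rfl
  | cons row m ih =>
    intro d hc
    rw [List.foldl_cons, ih _ (by simp [PySem.Dict.contains_insert]),
        PySem.Dict.keys_insert_of_contains _ _ hc]

def pvGLit (c : Int × Int) (row : List Int) : Int :=
  (if (c.1 * PySem.List.pyGetD row 3 0 - PySem.List.pyGetD row 1 0 + c.2)
        * (c.1 * PySem.List.pyGetD row 0 0 - PySem.List.pyGetD row 2 0 + c.2) = 0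
     then ([] : List Int) ++ [1] else ([] : List Int) ++ [0]).sum

theorem pvStepA_eq (n : List (List Int)) (d : PySem.Dict (Int × Int) Int) (c : Int × Int) :
    pvStepA n d c
      = n.foldl (fun a row => a.insert c (a.getD c 0 + pvGLit c row)) (d.insert c 0) := by
  have h := PySem.List.foldl_pyRange_zero_pyGetD n []
    (fun (a : PySem.Dict (Int × Int) Int) (row : List Int) =>
      a.insert c (a.getD c 0 + pvGLit c row)) (d.insert c 0)
  exact h

theorem pvStepA_get? (n : List (List Int)) (d : PySem.Dict (Int × Int) Int) (c : Int × Int)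
    (k : Int × Int) :
    (pvStepA n d c).get? k = if k = c then some (pvCnt n c) else d.get? k := by
  rw [pvStepA_eq,
    pvFoldIns_get? c _ n (d.insert c 0) 0 (by simp [PySem.Dict.get?_insert]) k]
  have : n.map (pvGLit c) = n.map (pvInd c.1 c.2) :=
    List.map_congr_left (fun row _ => pvRowBody_sum c.1 c.2 row)
  rw [this]
  split
  · simp [pvCnt]
  · next h => rw [PySem.Dict.get?_insert_of_ne _ _ h]

theorem pvStepA_keys (n : List (List Int)) (d : PySem.Dict (Int × Int) Int) (c : Int × Int)
    (hc : d.contains c = false) :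
    (pvStepA n d c).keys = d.keys ++ [c] := by
  rw [pvStepA_eq, pvFoldIns_keys c _ n _ (by simp [PySem.Dict.contains_insert]),
    PySem.Dict.keys_insert_of_not_contains _ _ hc]

def pvCells : List (Int × Int) :=
  (PySem.List.pyRange 0 10 1).flatMap (fun i => (PySem.List.pyRange 0 10 1).map (fun j => (i, j)))

theorem pvCells_nodup : pvCells.Nodup := by decide

theorem mem_pvCells {I J : Int} : (I, J) ∈ pvCells ↔ (0 ≤ I ∧ I < 10) ∧ (0 ≤ J ∧ J < 10) := by
  simp [pvCells, List.mem_flatMap, PySem.List.mem_pyRange_one]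

-- A's full dict-building loop, flattened over the 100 cells
theorem pvFoldCells (n : List (List Int)) :
    ∀ (cs : List (Int × Int)) (d : PySem.Dict (Int × Int) Int), cs.Nodup →
      (∀ c ∈ cs, d.contains c = false) →
      (cs.foldl (pvStepA n) d).keys = d.keys ++ cs ∧
      ∀ k, (cs.foldl (pvStepA n) d).get? k = if k ∈ cs then some (pvCnt n k) else d.get? k := by
  intro cs
  induction cs with
  | nil => intro d _ _; simp
  | cons c cs ih =>
    intro d hnd hfree
    have hc : d.contains c = false := hfree c (List.mem_cons_self ..)
    have hfree' : ∀ c' ∈ cs, (pvStepA n d c).contains c' = false := by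
      intro c' hc'
      have hne : c' ≠ c := fun h => (List.nodup_cons.1 hnd).1 (h ▸ hc')
      rw [← PySem.Dict.get?_eq_none_iff_contains, pvStepA_get?, if_neg hne,
        PySem.Dict.get?_eq_none_iff_contains]
      exact hfree c' (List.mem_cons_of_mem _ hc')
    obtain ⟨hk, hg⟩ := ih (pvStepA n d c) (List.nodup_cons.1 hnd).2 hfree'
    rw [List.foldl_cons]
    refine ⟨by rw [hk, pvStepA_keys n d c hc]; simp, ?_⟩
    intro k
    rw [hg k, pvStepA_get?]
    by_cases h1 : k ∈ cs
    · simp [h1]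
    · by_cases h2 : k = c <;> simp [h1, h2]

theorem funcA_a_eq (n : List (List Int)) :
    funcA_a n = pvCells.foldl (pvStepA n) PySem.Dict.empty := by
  have h := (List.foldl_flatMap (f := fun i => (PySem.List.pyRange 0 10 1).map (fun j => (i, j)))
    (g := pvStepA n) (l := PySem.List.pyRange 0 10 1) (init := (PySem.Dict.empty : PySem.Dict (Int × Int) Int)))
  rw [show pvCells.foldl (pvStepA n) PySem.Dict.empty
      = List.foldl (pvStepA n) PySem.Dict.empty pvCells from rfl, pvCells, h]
  simp only [List.foldl_map]
  rfl

def pvRoots (row : List Int) (i : Int) : List Int :=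
  if PySem.List.pyGetD row 1 0 - i * PySem.List.pyGetD row 3 0
      = PySem.List.pyGetD row 2 0 - i * PySem.List.pyGetD row 0 0
  then [PySem.List.pyGetD row 1 0 - i * PySem.List.pyGetD row 3 0]
  else [PySem.List.pyGetD row 1 0 - i * PySem.List.pyGetD row 3 0,
        PySem.List.pyGetD row 2 0 - i * PySem.List.pyGetD row 0 0]

theorem pvRoots_nodup (row : List Int) (i : Int) : (pvRoots row i).Nodup := by
  unfold pvRoots; split
  · simp
  · next h => simp [h]

theorem mem_pvRoots {row : List Int} {i J : Int} :
    J ∈ pvRoots row i ↔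
      (i * PySem.List.pyGetD row 3 0 - PySem.List.pyGetD row 1 0 + J = 0
        ∨ i * PySem.List.pyGetD row 0 0 - PySem.List.pyGetD row 2 0 + J = 0) := by
  unfold pvRoots; split <;> simp <;> constructor <;> intro h <;> rcases h with h | h <;> omega

theorem pvIndicator_eq (row : List Int) {I J : Int} :
    (if J ∈ pvRoots row I then (1 : Int) else 0) = pvInd I J row := by
  unfold pvInd
  by_cases h : J ∈ pvRoots row I
  · rw [if_pos h, mem_pvRoots] at *
    rw [if_pos (by rcases h with h | h <;> simp [h])]
  · rw [if_neg h, mem_pvRoots] at *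
    rw [if_neg (by rw [mul_eq_zero]; tauto)]

-- inner loop over the candidate roots at a fixed i
theorem pvRootsFold_getD (i I J : Int) (hJ0 : 0 ≤ J) (hJ9 : J ≤ 9) :
    ∀ (js : List Int), js.Nodup → ∀ (d : PySem.Dict (Int × Int) Int),
      (js.foldl (fun d j => if 0 ≤ j ∧ j ≤ 9 then d.modify (i, j) 0 (· + 1) else d) d).getD (I, J) 0
        = d.getD (I, J) 0 + (if i = I ∧ J ∈ js then 1 else 0) := by
  intro js
  induction js with
  | nil => intro _ d; simp
  | cons j js ih =>
    intro hnd d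
    have hj : j ∉ js := (List.nodup_cons.1 hnd).1
    rw [List.foldl_cons, ih hnd.of_cons _]
    have hstep : (if 0 ≤ j ∧ j ≤ 9 then d.modify (i, j) 0 (· + 1) else d).getD (I, J) 0
        = d.getD (I, J) 0 + (if i = I ∧ j = J then 1 else 0) := by
      by_cases hg : 0 ≤ j ∧ j ≤ 9
      · rw [if_pos hg, PySem.Dict.getD_modify]
        by_cases hij : (I, J) = (i, j)
        · rw [if_pos hij]
          rw [Prod.mk.injEq] at hij
          simp [hij.1.symm, hij.2.symm]
        · rw [if_neg hij]
          have hne : ¬ (i = I ∧ j = J) := fun ⟨h1, h2⟩ => hij (by rw [h1, h2])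
          simp [hne]
      · rw [if_neg hg]
        have hne : ¬ (i = I ∧ j = J) := fun ⟨h1, h2⟩ => hg ⟨h2 ▸ hJ0, h2 ▸ hJ9⟩
        simp [hne]
    rw [hstep]
    by_cases hiI : i = I <;> by_cases hjJ : j = J <;> by_cases hJjs : J ∈ js
    all_goals simp [hiI, hjJ, hJjs, List.mem_cons]
    all_goals try exact hj (hjJ ▸ hJjs)
    all_goals omega

theorem pvRowFold_getD (row : List Int) (I J : Int) (hJ0 : 0 ≤ J) (hJ9 : J ≤ 9) :
    ∀ (is : List Int), is.Nodup → ∀ (d : PySem.Dict (Int × Int) Int),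
      (is.foldl (fun d i => (pvRoots row i).foldl (fun d j =>
          if 0 ≤ j ∧ j ≤ 9 then d.modify (i, j) 0 (· + 1) else d) d) d).getD (I, J) 0
        = d.getD (I, J) 0 + (if I ∈ is ∧ J ∈ pvRoots row I then 1 else 0) := by
  intro is
  induction is with
  | nil => intro _ d; simp
  | cons i is ih =>
    intro hnd d
    have hi : i ∉ is := (List.nodup_cons.1 hnd).1
    rw [List.foldl_cons, ih hnd.of_cons _,
      pvRootsFold_getD i I J hJ0 hJ9 (pvRoots row i) (pvRoots_nodup row i) d]
    by_cases hiI : i = I <;> by_cases hIis : I ∈ is <;>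
      by_cases hJr : J ∈ pvRoots row I
    all_goals simp [hiI, hIis, hJr, List.mem_cons]
    all_goals try exact hi (hiI ▸ hIis)
    all_goals omega

-- keys preservation through one row update
theorem pvRootsFold_keys (i : Int) (hi0 : 0 ≤ i) (hi9 : i < 10) :
    ∀ (js : List Int) (d : PySem.Dict (Int × Int) Int), d.keys = pvCells →
      (js.foldl (fun d j => if 0 ≤ j ∧ j ≤ 9 then d.modify (i, j) 0 (· + 1) else d) d).keys
        = pvCells := by
  intro js
  induction js with
  | nil => intro d h; exact h
  | cons j js ih =>
    intro d h
    rw [List.foldl_cons]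
    apply ih
    by_cases hg : 0 ≤ j ∧ j ≤ 9
    · rw [if_pos hg, PySem.Dict.keys_modify,
        PySem.Dict.keys_insert_of_contains _ _ (by
          rw [PySem.Dict.contains_iff_mem_keys, h, mem_pvCells]
          exact ⟨⟨hi0, hi9⟩, hg.1, by omega⟩)]
      exact h
    · rw [if_neg hg]; exact h

theorem pvRowFold_keys (row : List Int) :
    ∀ (is : List Int), (∀ i ∈ is, 0 ≤ i ∧ i < 10) →
      ∀ (d : PySem.Dict (Int × Int) Int), d.keys = pvCells →
      (is.foldl (fun d i => (pvRoots row i).foldl (fun d j =>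
          if 0 ≤ j ∧ j ≤ 9 then d.modify (i, j) 0 (· + 1) else d) d) d).keys = pvCells := by
  intro is
  induction is with
  | nil => intro _ d h; exact h
  | cons i is ih =>
    intro hb d h
    rw [List.foldl_cons]
    exact ih (fun i' hi' => hb i' (List.mem_cons_of_mem _ hi'))
      _ (pvRootsFold_keys i (hb i (List.mem_cons_self ..)).1 (hb i (List.mem_cons_self ..)).2
          (pvRoots row i) d h)

-- the whole record loop of B
theorem pvRowsFold (n : List (List Int)) :
    ∀ (d : PySem.Dict (Int × Int) Int), d.keys = pvCells →
      (n.foldl (fun d row => (PySem.List.pyRange 0 10 1).foldl (fun d i =>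
          (pvRoots row i).foldl (fun d j =>
            if 0 ≤ j ∧ j ≤ 9 then d.modify (i, j) 0 (· + 1) else d) d) d) d).keys = pvCells ∧
      ∀ I J : Int, 0 ≤ I → I < 10 → 0 ≤ J → J < 10 →
        (n.foldl (fun d row => (PySem.List.pyRange 0 10 1).foldl (fun d i =>
            (pvRoots row i).foldl (fun d j =>
              if 0 ≤ j ∧ j ≤ 9 then d.modify (i, j) 0 (· + 1) else d) d) d) d).getD (I, J) 0
          = d.getD (I, J) 0 + pvCnt n (I, J) := by
  induction n with
  | nil => intro d h; exact ⟨h, by intro I J _ _ _ _; simp [pvCnt]⟩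
  | cons row m ih =>
    intro d h
    have hkeys : ((PySem.List.pyRange 0 10 1).foldl (fun d i =>
        (pvRoots row i).foldl (fun d j =>
          if 0 ≤ j ∧ j ≤ 9 then d.modify (i, j) 0 (· + 1) else d) d) d).keys = pvCells :=
      pvRowFold_keys row _ (fun i hi => by
        rw [PySem.List.mem_pyRange_one] at hi; exact ⟨hi.1, hi.2⟩) d h
    obtain ⟨hk, hg⟩ := ih _ hkeys
    refine ⟨by rw [List.foldl_cons]; exact hk, ?_⟩
    intro I J hI0 hI9 hJ0 hJ9
    rw [List.foldl_cons, hg I J hI0 hI9 hJ0 hJ9,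
      pvRowFold_getD row I J hJ0 (by omega) _ (PySem.List.nodup_pyRange_one 0 10) d]
    have hImem : I ∈ PySem.List.pyRange 0 10 1 := (PySem.List.mem_pyRange_one ..).2 ⟨hI0, hI9⟩
    have hsimp : (I ∈ PySem.List.pyRange 0 10 1 ∧ J ∈ pvRoots row I) ↔ J ∈ pvRoots row I := by
      simp [hImem]
    rw [if_congr hsimp rfl rfl, pvIndicator_eq row]
    simp [pvCnt]
    ring

set_option maxRecDepth 40000 in
theorem funcB_init_keys : funcB_init.keys = pvCells := by decide

set_option maxRecDepth 40000 in
theorem funcB_init_getD : ∀ c ∈ pvCells, funcB_init.getD c 0 = 0 := by decide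

theorem funcB_a_eq (n : List (List Int)) :
    funcB_a n = n.foldl (fun d row => (PySem.List.pyRange 0 10 1).foldl (fun d i =>
      (pvRoots row i).foldl (fun d j =>
        if 0 ≤ j ∧ j ≤ 9 then d.modify (i, j) 0 (· + 1) else d) d) d) funcB_init := rfl

theorem funcB_a_keys (n : List (List Int)) : (funcB_a n).keys = pvCells := by
  rw [funcB_a_eq]; exact (pvRowsFold n funcB_init funcB_init_keys).1

theorem funcB_a_getD (n : List (List Int)) :
    ∀ c ∈ pvCells, (funcB_a n).getD c 0 = pvCnt n c := by
  rintro ⟨I, J⟩ hc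
  obtain ⟨⟨hI0, hI9⟩, hJ0, hJ9⟩ := mem_pvCells.1 hc
  rw [funcB_a_eq, (pvRowsFold n funcB_init funcB_init_keys).2 I J hI0 hI9 hJ0 hJ9,
    funcB_init_getD _ hc, zero_add]

theorem funcA_a_keys (n : List (List Int)) : (funcA_a n).keys = pvCells := by
  rw [funcA_a_eq]
  have := (pvFoldCells n pvCells PySem.Dict.empty pvCells_nodup
    (fun c _ => PySem.Dict.contains_empty c)).1
  rw [this]; rfl

theorem funcA_a_getD (n : List (List Int)) :
    ∀ c ∈ pvCells, (funcA_a n).getD c 0 = pvCnt n c := by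
  intro c hc
  rw [funcA_a_eq, PySem.Dict.getD_eq_get?_getD,
    (pvFoldCells n pvCells PySem.Dict.empty pvCells_nodup
      (fun c _ => PySem.Dict.contains_empty c)).2 c, if_pos hc]
  rfl

-- A's first-strict-max scan step over (key, value) pairs already mapped to keys
def pvStepL {α : Type} (f1 f2 : α → Int) (a1 : Option α) (x : α) : Option α :=
  match a1 with
  | none => some x
  | some m => if f1 m < f2 x then some x else a1

-- the running state of Python's max(xs, key=...)
def pvStepM {α : Type} (g : α → Int) (acc : Option α) (x : α) : Option α :=
  match acc with
  | none => some x
  | some m => if g m < g x then some x else some m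

theorem pvArgmaxA {α : Type} (f1 f2 g : α → Int) (cs : List α)
    (h1 : ∀ c ∈ cs, f1 c = g c) (h2 : ∀ c ∈ cs, f2 c = g c) :
    ∀ acc : Option α, (∀ m, acc = some m → f1 m = g m) →
      cs.foldl (pvStepL f1 f2) acc = cs.foldl (pvStepM g) acc := by
  induction cs with
  | nil => intro acc _; rfl
  | cons x cs ih =>
    intro acc hacc
    have h1' := fun c hc => h1 c (List.mem_cons_of_mem _ hc)
    have h2' := fun c hc => h2 c (List.mem_cons_of_mem _ hc)
    rw [List.foldl_cons, List.foldl_cons]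
    cases acc with
    | none =>
      rw [show pvStepL f1 f2 none x = some x from rfl,
        show pvStepM g none x = some x from rfl]
      exact ih h1' h2' (some x) (fun m hm => by cases hm; exact h1 x (List.mem_cons_self ..))
    | some m =>
      have hf1 : f1 m = g m := hacc m rfl
      rw [show pvStepL f1 f2 (some m) x = if f1 m < f2 x then some x else some m from rfl,
        show pvStepM g (some m) x = if g m < g x then some x else some m from rfl,
        hf1, h2 x (List.mem_cons_self ..)]
      refine ih h1' h2' _ (fun m' hm' => ?_)
      split at hm'
      · cases hm'; exact h1 x (List.mem_cons_self ..)
      · cases hm'; exact hf1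

theorem pvMax?Congr {α : Type} (f g : α → Int) (cs : List α) (h : ∀ c ∈ cs, f c = g c) :
    PySem.List.max? cs f = PySem.List.max? cs g := by
  have main : ∀ (cs' : List α), (∀ c ∈ cs', f c = g c) →
      ∀ acc : Option α, (∀ m, acc = some m → f m = g m) →
      cs'.foldl (pvStepM f) acc = cs'.foldl (pvStepM g) acc := by
    intro cs'
    induction cs' with
    | nil => intro _ acc _; rfl
    | cons x cs' ih =>
      intro hcs acc hacc
      have h' := fun c hc => hcs c (List.mem_cons_of_mem _ hc)
      rw [List.foldl_cons, List.foldl_cons]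
      cases acc with
      | none =>
        rw [show pvStepM f none x = some x from rfl, show pvStepM g none x = some x from rfl]
        exact ih h' (some x) (fun m hm => by cases hm; exact hcs x (List.mem_cons_self ..))
      | some m =>
        have hf : f m = g m := hacc m rfl
        rw [show pvStepM f (some m) x = if f m < f x then some x else some m from rfl,
          show pvStepM g (some m) x = if g m < g x then some x else some m from rfl,
          hf, hcs x (List.mem_cons_self ..)]
        refine ih h' _ (fun m' hm' => ?_)
        split at hm'
        · cases hm'; exact hcs x (List.mem_cons_self ..)
        · cases hm'; exact hf
  exact main cs h none (fun _ hm => by cases hm)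

def pvStepItems (a : PySem.Dict (Int × Int) Int) (a1 : Option (Int × Int))
    (xy : (Int × Int) × Int) : Option (Int × Int) :=
  match a1 with
  | none => some xy.1
  | some k => if a.getD k 0 < xy.2 then some xy.1 else a1

theorem pvMatchGetD (o : Option (Int × Int)) :
    (match o with
      | some k => (k.1, k.2)
      | none => ((0 : Int), (0 : Int))) = o.getD (0, 0) := by
  cases o <;> rfl


-- ===== VERDICT (by name: the statement is the Claim_ definition above) =====
theorem func_spec : Claim_equal_func := by
  intro n _ _
  show func n = func_alt n
  have hkA := funcA_a_keys n
  have hndA : (funcA_a n).keys.Nodup := hkA ▸ pvCells_nodup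
  have hitems : (funcA_a n).items = pvCells.map (fun k => (k, pvCnt n k)) := by
    rw [PySem.Dict.items_eq_map_keys _ hndA 0, hkA]
    exact List.map_congr_left (fun k hk => by rw [funcA_a_getD n k hk])
  have e1 : func n = ((funcA_a n).items.foldl (pvStepItems (funcA_a n)) none).getD (0, 0) :=
    pvMatchGetD _
  have e2 : (funcA_a n).items.foldl (pvStepItems (funcA_a n)) none
      = pvCells.foldl (pvStepL (fun m => (funcA_a n).getD m 0) (pvCnt n)) none := by
    have hfun : (fun (x : Option (Int × Int)) (y : Int × Int) =>
        pvStepItems (funcA_a n) x (y, pvCnt n y))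
        = pvStepL (fun m => (funcA_a n).getD m 0) (pvCnt n) := by
      funext x y; cases x <;> rfl
    rw [hitems, List.foldl_map, hfun]
  have e3 := pvArgmaxA (fun m => (funcA_a n).getD m 0) (pvCnt n) (pvCnt n) pvCells
    (funcA_a_getD n) (fun _ _ => rfl) none (fun _ hm => by cases hm)
  have e4 : func_alt n
      = (PySem.List.max? pvCells (fun k => (funcB_a n).getD k 0)).getD (0, 0) := by
    rw [show func_alt n
        = (PySem.List.max? (funcB_a n).keys (fun k => (funcB_a n).getD k 0)).getD (0, 0)
      from rfl, funcB_a_keys]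
  have e5 := pvMax?Congr (fun k => (funcB_a n).getD k 0) (pvCnt n) pvCells (funcB_a_getD n)
  have e6 : PySem.List.max? pvCells (pvCnt n) = pvCells.foldl (pvStepM (pvCnt n)) none := rfl
  rw [e1, e2, e3, e4, e5, e6]
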